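-- pv_equiv track=rewrite | github.com/saturnsky/plusplus | plusplus.py | find_arabia
-- ===== SOURCE A (Python) =====
-- def find_arabia(src):
--     start, end, position = -1, -1, -1
--     mode = 'arabia'
--     for char in src:
--         position += 1
--         if '0' <= char <= '9':
--             if end == position:
--                 end = position + 1
--             else:
--                 start, end = position, position + 1
--
--     if start == -1:
--         mode = None
--
--     return start, end, mode
-- ===== SOURCE B (Python) =====
-- def find_arabia(src):
--     n = len(src)
--     e = n - 1
--     while e >= 0 and not ('0' <= src[e] <= '9'):
--         e -= 1
--     if e < 0:
--         return -1, -1, None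
--     s = e
--     while s > 0 and '0' <= src[s - 1] <= '9':
--         s -= 1
--     return s, e + 1, 'arabia'
-- ===== Notes on version B (the rewrite author's own statement) =====
-- stated objective: alternative
-- what changed: B scans backward from the end of the string, stopping at the last digit and then walking back over the run, instead of A's full forward pass that maintains a running (start,end) state over every character.
import Mathlib
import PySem

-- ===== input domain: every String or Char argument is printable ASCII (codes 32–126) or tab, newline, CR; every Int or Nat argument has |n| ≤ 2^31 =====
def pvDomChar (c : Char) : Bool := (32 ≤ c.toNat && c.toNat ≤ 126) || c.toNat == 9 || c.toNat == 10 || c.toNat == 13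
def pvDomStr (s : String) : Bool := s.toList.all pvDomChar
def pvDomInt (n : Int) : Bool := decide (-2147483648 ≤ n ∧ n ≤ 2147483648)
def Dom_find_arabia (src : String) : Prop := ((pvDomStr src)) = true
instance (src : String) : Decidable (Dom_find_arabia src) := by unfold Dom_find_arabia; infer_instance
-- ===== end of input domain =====

-- B replaces A's full forward pass with a backward scan that stops after the last digit run (objective: alternative).

-- the literal '0' <= c <= '9' test both Pythons write
def isDig (c : Char) : Bool := '0' ≤ c && c ≤ '9'

-- ===== PORT A =====
-- A's loop state: (start, end, position); one step per character, in A's branch order.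
def stepA (st : Int × Int × Int) (c : Char) : Int × Int × Int :=
  let p := st.2.2 + 1
  if isDig c then
    if st.2.1 = p then (st.1, p + 1, p) else (p, p + 1, p)
  else (st.1, st.2.1, p)

def find_arabia (src : String) : Int × Int × Option String :=
  let st := src.toList.foldl stepA (-1, -1, -1)
  (st.1, st.2.1, if st.1 = -1 then none else some "arabia")

-- ===== PORT B =====
-- character at index i (B only reads indices that are in range)
def chAt (cs : List Char) (i : Nat) : Char := cs.getD i ' '

-- B's first while-loop: e starts at n-1 and moves down while src[e] is not a digit;
-- encoded on e+1 (so 0 plays the role of e < 0): returns the index of the last digit, if any.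
def lastDigitIdx (cs : List Char) : Nat → Option Nat
  | 0 => none
  | e + 1 => if isDig (chAt cs e) then some e else lastDigitIdx cs e

-- B's second while-loop: s moves down from e while s > 0 and src[s-1] is a digit.
def runStart (cs : List Char) : Nat → Nat
  | 0 => 0
  | s + 1 => if isDig (chAt cs s) then runStart cs s else s + 1

def find_arabia_alt (src : String) : Int × Int × Option String :=
  let cs := src.toList
  match lastDigitIdx cs cs.length with
  | none => (-1, -1, none)
  | some e => ((runStart cs e : Int), (e : Int) + 1, some "arabia")

-- ===== PRECONDITION & SPEC =====
def Spec_find_arabia (src : String) (out : Int × Int × Option String) : Prop := out = find_arabia_alt src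
instance (src : String) (out : Int × Int × Option String) : Decidable (Spec_find_arabia src out) := by unfold Spec_find_arabia; infer_instance

-- ===== CLAIM (what is proved, stated in full; the proofs are below) =====
def Claim_equal_find_arabia : Prop := ∀ (src : String), Dom_find_arabia src → Spec_find_arabia src (find_arabia src)

-- ===== LEMMAS AND PROOFS =====

theorem chAt_append_lt {l : List Char} (c : Char) {n : Nat} (h : n < l.length) :
    chAt (l ++ [c]) n = chAt l n := by
  simp [chAt, List.getD, List.getElem?_append_left h]

theorem chAt_concat (l : List Char) (c : Char) : chAt (l ++ [c]) l.length = c := by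
  simp [chAt, List.getD]

-- B's loops only look at indices below their bound, so an appended character is invisible
theorem lastDigitIdx_append {l : List Char} (c : Char) : ∀ {i : Nat}, i ≤ l.length →
    lastDigitIdx (l ++ [c]) i = lastDigitIdx l i := by
  intro i
  induction i with
  | zero => intro _; rfl
  | succ n ih =>
    intro h
    have hn : n < l.length := h
    rw [lastDigitIdx, lastDigitIdx, chAt_append_lt c hn, ih (Nat.le_of_lt hn)]

theorem runStart_append {l : List Char} (c : Char) : ∀ {i : Nat}, i ≤ l.length →
    runStart (l ++ [c]) i = runStart l i := by
  intro i
  induction i with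
  | zero => intro _; rfl
  | succ n ih =>
    intro h
    have hn : n < l.length := h
    rw [runStart, runStart, chAt_append_lt c hn, ih (Nat.le_of_lt hn)]

theorem lastDigitIdx_lt {cs : List Char} : ∀ {i e : Nat}, lastDigitIdx cs i = some e → e < i := by
  intro i
  induction i with
  | zero => intro e h; simp [lastDigitIdx] at h
  | succ n ih =>
    intro e h
    rw [lastDigitIdx] at h
    split at h
    · cases h; omega
    · exact Nat.lt_succ_of_lt (ih h)

-- B's characterization of A's loop state after any prefix
def specState (cs : List Char) : Int × Int :=
  match lastDigitIdx cs cs.length with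
  | none => (-1, -1)
  | some e => ((runStart cs e : Int), (e : Int) + 1)

theorem fold_eq (cs : List Char) :
    cs.foldl stepA (-1, -1, -1) = ((specState cs).1, (specState cs).2, (cs.length : Int) - 1) := by
  induction cs using List.reverseRecOn with
  | nil => simp [specState, lastDigitIdx]
  | append_singleton l c ih =>
    rw [List.foldl_append, ih]
    have hlen : ((l ++ [c]).length : Int) = (l.length : Int) + 1 := by simp
    have hp : ((l.length : Int) - 1) + 1 = (l.length : Int) := by omega
    simp only [List.foldl_cons, List.foldl_nil]
    unfold stepA
    simp only [hp, hlen]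
    by_cases hd : isDig c
    · -- appended char is a digit: the run now ends at l.length
      have hlast : lastDigitIdx (l ++ [c]) (l.length + 1) = some l.length := by
        rw [lastDigitIdx, chAt_concat, hd]; simp
      by_cases hl : ∃ m, l.length = m + 1 ∧ isDig (chAt l m)
      · -- l itself ends with a digit: the run extends, start unchanged
        obtain ⟨m, hm, hdm⟩ := hl
        have hlidx : lastDigitIdx l l.length = some m := by
          rw [hm, lastDigitIdx, hdm]; simp
        have hS : specState l = ((runStart l m : Int), (m : Int) + 1) := by
          rw [specState, hlidx]
        have hrun : runStart (l ++ [c]) l.length = runStart l m := by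
          rw [hm, runStart, chAt_append_lt c (by omega), hdm,
            runStart_append c (by omega)]; simp
        have hgoal : specState (l ++ [c]) = ((runStart l m : Int), (l.length : Int) + 1) := by
          simp only [specState, List.length_append, List.length_cons, List.length_nil,
            Nat.zero_add, hlast, hrun]
        have hme : ((m : Int) + 1) = (l.length : Int) := by omega
        rw [hgoal, hS]
        simp [hd, hme]
      · -- l is empty or does not end with a digit: a new one-character run starts here
        have hrun : runStart (l ++ [c]) l.length = l.length := by
          cases hL : l.length with
          | zero => rfl
          | succ m =>
            have hdm : ¬ isDig (chAt l m) := fun h => hl ⟨m, hL, h⟩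
            rw [runStart, chAt_append_lt c (by omega)]
            simp [hdm]
        have hne : (specState l).2 ≠ (l.length : Int) := by
          cases hidx : lastDigitIdx l l.length with
          | none => simp [specState, hidx]
          | some e =>
            have he : e < l.length := lastDigitIdx_lt hidx
            have hne1 : e + 1 ≠ l.length := by
              intro hE
              obtain ⟨m, hm⟩ : ∃ m, l.length = m + 1 := ⟨e, hE.symm⟩
              have hdm : isDig (chAt l m) := by
                by_contra hc
                rw [hm, lastDigitIdx] at hidx
                simp [hc] at hidx
                exact absurd (lastDigitIdx_lt hidx) (by omega)
              exact hl ⟨m, hm, hdm⟩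
            simp [specState, hidx]
            omega
        have hgoal : specState (l ++ [c]) = ((l.length : Int), (l.length : Int) + 1) := by
          simp only [specState, List.length_append, List.length_cons, List.length_nil,
            Nat.zero_add, hlast, hrun]
        rw [hgoal]
        simp [hd, if_neg hne]
    · -- appended char not a digit: the state is unchanged (only position advances)
      have hlast : lastDigitIdx (l ++ [c]) (l.length + 1) = lastDigitIdx l l.length := by
        rw [lastDigitIdx, chAt_concat]
        simp [hd, lastDigitIdx_append c (le_refl l.length)]
      have hgoal : specState (l ++ [c]) = specState l := by
        simp only [specState, List.length_append, List.length_cons, List.length_nil,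
          Nat.zero_add, hlast]
        cases hidx : lastDigitIdx l l.length with
        | none => rfl
        | some e =>
          have he : e < l.length := lastDigitIdx_lt hidx
          simp [runStart_append c (le_of_lt he)]
      rw [hgoal]
      simp [hd]

-- ===== VERDICT (by name: the statement is the Claim_ definition above) =====
theorem find_arabia_spec : Claim_equal_find_arabia := by
  intro src _
  unfold Spec_find_arabia find_arabia find_arabia_alt
  rw [fold_eq]
  unfold specState
  have hlen : src.toList.length = src.length := by simp
  rw [hlen]
  cases hidx : lastDigitIdx src.toList src.length with
  | none => simp [hidx]
  | some e => simp [hidx]
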